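-- pv_equiv track=rewrite | github.com/pcichowski/bio25a1 | edta.py | edit_distance_alignment
-- ===== SOURCE A (Python) =====
-- def edit_distance_alignment(s, t):
--     m, n = len(s), len(t)
--     dp = [[0]*(n+1) for _ in range(m+1)]
--     back = [[None]*(n+1) for _ in range(m+1)]
--
--     for i in range(1, m+1):
--         dp[i][0] = i
--         back[i][0] = 'U'
--     for j in range(1, n+1):
--         dp[0][j] = j
--         back[0][j] = 'L'
--
--     for i in range(1, m+1):
--         for j in range(1, n+1):
--             if s[i-1] == t[j-1]:
--                 dp[i][j] = dp[i-1][j-1]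
--                 back[i][j] = 'D'
--             else:
--                 options = [(dp[i-1][j-1]+1, 'D'), (dp[i-1][j]+1, 'U'), (dp[i][j-1]+1, 'L')]
--                 dp[i][j], back[i][j] = min(options, key=lambda x:x[0])
--
--     i, j = m, n
--     s_align, t_align = [], []
--     while i > 0 or j > 0:
--         if back[i][j] == 'D':
--             s_align.append(s[i-1])
--             t_align.append(t[j-1])
--             i -= 1
--             j -= 1
--         elif back[i][j] == 'U':
--             s_align.append(s[i-1])
--             t_align.append('-')
--             i -= 1
--         elif back[i][j] == 'L':
--             s_align.append('-')
--             t_align.append(t[j-1])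
--             j -= 1
--
--     return dp[m][n], ''.join(reversed(s_align)), ''.join(reversed(t_align))
-- ===== SOURCE B (Python) =====
-- def edit_distance_alignment(s, t):
--     n = len(t)
--     prev = [(j, '-' * j, t[:j]) for j in range(n + 1)]
--     for i, c in enumerate(s, 1):
--         cur = [(i, s[:i], '-' * i)]
--         for j, d in enumerate(t, 1):
--             if c == d:
--                 v, a, b = prev[j - 1]
--                 cur.append((v, a + c, b + d))
--             else:
--                 cand = [(prev[j - 1][0], prev[j - 1][1] + c, prev[j - 1][2] + d),
--                         (prev[j][0], prev[j][1] + c, prev[j][2] + '-'),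
--                         (cur[j - 1][0], cur[j - 1][1] + '-', cur[j - 1][2] + d)]
--                 v, a, b = min(cand, key=lambda x: x[0])
--                 cur.append((v + 1, a, b))
--         prev = cur
--     return prev[n]
-- ===== Notes on version B (the rewrite author's own statement) =====
-- stated objective: alternative
-- what changed: B drops A's back-pointer table and the whole backtracking loop: each dp cell carries its alignment strings forward (rolling two rows), so the answer is read directly from the last cell with no pointer storage and no reverse pass; it trades that for storing alignment prefixes in the cells.
import Mathlib
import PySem

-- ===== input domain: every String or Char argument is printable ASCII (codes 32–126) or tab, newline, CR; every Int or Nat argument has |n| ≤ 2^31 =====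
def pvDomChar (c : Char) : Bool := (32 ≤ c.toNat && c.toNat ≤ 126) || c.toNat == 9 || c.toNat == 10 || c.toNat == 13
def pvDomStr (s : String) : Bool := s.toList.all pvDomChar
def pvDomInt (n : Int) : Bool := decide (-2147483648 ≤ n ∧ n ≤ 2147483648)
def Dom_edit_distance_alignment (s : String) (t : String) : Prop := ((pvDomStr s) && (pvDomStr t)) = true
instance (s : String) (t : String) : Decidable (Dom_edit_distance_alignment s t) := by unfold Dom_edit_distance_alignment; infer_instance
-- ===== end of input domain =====

-- B replaces A's back-pointer table and backtracking loop by cells that carry their own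
-- alignment strings forward over two rolling rows (objective: alternative — same tie-break,
-- no pointer storage, at the price of storing alignment prefixes).

-- ===== PORT A =====

-- Python's list(range(n+1)) as a list of ints, built left to right
def dpRow0 : Nat → List Int
  | 0 => [0]
  | n+1 => dpRow0 n ++ [(n : Int) + 1]

-- Python's min(options, key=fst) over the 3-element list: keep the first strictly smaller.
def pickMinA (a b c : Int × Char) : Int × Char :=
  let m1 := if b.1 < a.1 then b else a
  if c.1 < m1.1 then c else m1

-- inner j-loop of A: builds dp row i and back row i (index 0 already initialised to i / 'U')
def rowA (ct : List Char) (sc : Char) (prevD : List Int) (iVal : Int) : Nat → List Int × List Char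
  | 0 => ([iVal], ['U'])
  | j+1 =>
    let r := rowA ct sc prevD iVal j
    if sc == ct.getD j ' ' then
      (r.1 ++ [prevD.getD j 0], r.2 ++ ['D'])
    else
      let p := pickMinA (prevD.getD j 0 + 1, 'D') (prevD.getD (j+1) 0 + 1, 'U')
                        (r.1.getD j 0 + 1, 'L')
      (r.1 ++ [p.1], r.2 ++ [p.2])

-- outer i-loop of A; row 0 is dp[0][j] = j, back[0][j] = 'L' ('N' encodes Python's None,
-- sitting at back[0][0], which the backtrack loop never reads).
def tableA (cs ct : List Char) (n : Nat) : Nat → List (List Int) × List (List Char)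
  | 0 => ([dpRow0 n], ['N' :: List.replicate n 'L'])
  | i+1 =>
    let t := tableA cs ct n i
    let r := rowA ct (cs.getD i ' ') (t.1.getD i []) ((i : Int) + 1) n
    (t.1 ++ [r.1], t.2 ++ [r.2])

-- A's while-loop, driven by the back table; fuel m+n makes the recursion total (each
-- reachable iteration decreases i+j by at least one, exactly as in Python).
def loopA (bkT : List (List Char)) (cs ct : List Char) :
    Nat → Nat → Nat → List Char → List Char → List Char × List Char
  | 0, _, _, sa, ta => (sa, ta)
  | fuel+1, i, j, sa, ta =>
    if i = 0 ∧ j = 0 then (sa, ta)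
    else
      let b := (bkT.getD i []).getD j 'N'
      if b = 'D' then
        loopA bkT cs ct fuel (i-1) (j-1) (sa ++ [cs.getD (i-1) ' ']) (ta ++ [ct.getD (j-1) ' '])
      else if b = 'U' then
        loopA bkT cs ct fuel (i-1) j (sa ++ [cs.getD (i-1) ' ']) (ta ++ ['-'])
      else if b = 'L' then
        loopA bkT cs ct fuel i (j-1) (sa ++ ['-']) (ta ++ [ct.getD (j-1) ' '])
      else (sa, ta)  -- unreachable with the table built above

def edit_distance_alignment (s : String) (t : String) : Int × String × String :=
  let cs := s.toList
  let ct := t.toList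
  let m := cs.length
  let n := ct.length
  let T := tableA cs ct n m
  let r := loopA T.2 cs ct (m+n) m n [] []
  (((T.1.getD m []).getD n 0), String.ofList r.1.reverse, String.ofList r.2.reverse)

-- ===== PORT B =====

-- a dp cell of B: (cost, s-alignment so far, t-alignment so far)
-- Python's min(cand, key=lambda x: x[0]) over the 3-element candidate list
def pickMinF (a b c : Int × List Char × List Char) : Int × List Char × List Char :=
  let m1 := if b.1 < a.1 then b else a
  if c.1 < m1.1 then c else m1

-- inner j-loop of B: extends the current row 'cur' (already holding its border cell)
def rowF (ct : List Char) (c : Char) (prev : List (Int × List Char × List Char))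
    (start : Int × List Char × List Char) : Nat → List (Int × List Char × List Char)
  | 0 => [start]
  | j+1 =>
    let cur := rowF ct c prev start j
    let d := ct.getD j ' '
    if c == d then
      let p := prev.getD j (0, [], [])
      cur ++ [(p.1, p.2.1 ++ [c], p.2.2 ++ [d])]
    else
      let p1 := prev.getD j (0, [], [])
      let p2 := prev.getD (j+1) (0, [], [])
      let p3 := cur.getD j (0, [], [])
      let q := pickMinF (p1.1, p1.2.1 ++ [c], p1.2.2 ++ [d])
                        (p2.1, p2.2.1 ++ [c], p2.2.2 ++ ['-'])
                        (p3.1, p3.2.1 ++ ['-'], p3.2.2 ++ [d])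
      cur ++ [(q.1 + 1, q.2)]

-- outer i-loop of B over the characters of s, keeping only the previous row
def rowsF (cs ct : List Char) (n : Nat) : Nat → List (Int × List Char × List Char)
  | 0 => (List.range (n+1)).map (fun (j : Nat) => ((j : Int), List.replicate j '-', ct.take j))
  | i+1 => rowF ct (cs.getD i ' ') (rowsF cs ct n i)
             (((i : Int) + 1), cs.take (i+1), List.replicate (i+1) '-') n

def edit_distance_alignment_alt (s : String) (t : String) : Int × String × String :=
  let cs := s.toList
  let ct := t.toList
  let r := (rowsF cs ct ct.length cs.length).getD ct.length (0, [], [])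
  (r.1, String.ofList r.2.1, String.ofList r.2.2)

-- ===== PRECONDITION & SPEC =====
def Spec_edit_distance_alignment (s : String) (t : String) (out : Int × String × String) : Prop := out = edit_distance_alignment_alt s t
instance (s : String) (t : String) (out : Int × String × String) : Decidable (Spec_edit_distance_alignment s t out) := by unfold Spec_edit_distance_alignment; infer_instance

-- ===== CLAIM (what is proved, stated in full; the proofs are below) =====
def Claim_equal_edit_distance_alignment : Prop := ∀ (s : String) (t : String), Dom_edit_distance_alignment s t → Spec_edit_distance_alignment s t (edit_distance_alignment s t)

-- ===== LEMMAS AND PROOFS =====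

-- the dp recurrence A computes
def Espec (cs ct : List Char) : Nat → Nat → Int
  | 0, j => (j : Int)
  | i+1, 0 => (i : Int) + 1
  | i+1, j+1 =>
    if cs.getD i ' ' == ct.getD j ' ' then Espec cs ct i j
    else (pickMinA (Espec cs ct i j + 1, 'D') (Espec cs ct i (j+1) + 1, 'U')
                   (Espec cs ct (i+1) j + 1, 'L')).1
termination_by i j => (i, j)

-- the back pointer A stores at (i, j)
def Bspec (cs ct : List Char) : Nat → Nat → Char
  | 0, 0 => 'N'
  | 0, _+1 => 'L'
  | _+1, 0 => 'U'
  | i+1, j+1 =>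
    if cs.getD i ' ' == ct.getD j ' ' then 'D'
    else (pickMinA (Espec cs ct i j + 1, 'D') (Espec cs ct i (j+1) + 1, 'U')
                   (Espec cs ct (i+1) j + 1, 'L')).2

-- the cell B computes at (i, j)
def Fspec (cs ct : List Char) : Nat → Nat → Int × List Char × List Char
  | 0, j => ((j : Int), List.replicate j '-', ct.take j)
  | i+1, 0 => ((i : Int) + 1, cs.take (i+1), List.replicate (i+1) '-')
  | i+1, j+1 =>
    let c := cs.getD i ' '
    let d := ct.getD j ' '
    if c == d then
      let p := Fspec cs ct i j
      (p.1, p.2.1 ++ [c], p.2.2 ++ [d])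
    else
      let p1 := Fspec cs ct i j
      let p2 := Fspec cs ct i (j+1)
      let p3 := Fspec cs ct (i+1) j
      let q := pickMinF (p1.1, p1.2.1 ++ [c], p1.2.2 ++ [d])
                        (p2.1, p2.2.1 ++ [c], p2.2.2 ++ ['-'])
                        (p3.1, p3.2.1 ++ ['-'], p3.2.2 ++ [d])
      (q.1 + 1, q.2)
termination_by i j => (i, j)

theorem getD_snoc_lt {α : Type} (l : List α) (x d : α) (i : Nat) (h : i < l.length) :
    (l ++ [x]).getD i d = l.getD i d := by
  simp [List.getD, List.getElem?_append_left h]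

theorem getD_snoc_at {α : Type} (l : List α) (x d : α) (i : Nat) (h : l.length = i) :
    (l ++ [x]).getD i d = x := by
  subst h; simp [List.getD]

theorem dpRow0_len (n : Nat) : (dpRow0 n).length = n + 1 := by
  induction n with
  | zero => simp [dpRow0]
  | succ n ih => simp [dpRow0, ih]

theorem dpRow0_getD (n k : Nat) (h : k ≤ n) : (dpRow0 n).getD k 0 = (k : Int) := by
  induction n with
  | zero => interval_cases k; simp [dpRow0, List.getD]
  | succ n ih =>
    rcases Nat.lt_or_ge k (n+1) with hlt | hge
    · rw [dpRow0, getD_snoc_lt _ _ _ k (by rw [dpRow0_len]; omega)]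
      exact ih (by omega)
    · have : k = n + 1 := by omega
      subst this
      rw [dpRow0, getD_snoc_at _ _ _ _ (dpRow0_len n)]
      push_cast; ring

theorem rowA_len (ct : List Char) (sc : Char) (prevD : List Int) (iVal : Int) (j : Nat) :
    (rowA ct sc prevD iVal j).1.length = j + 1 ∧ (rowA ct sc prevD iVal j).2.length = j + 1 := by
  induction j with
  | zero => simp [rowA]
  | succ j ih =>
    simp only [rowA]
    split <;> simp [ih.1, ih.2]

theorem rowA_spec (cs ct : List Char) (i : Nat) (prevD : List Int)
    (hprev : ∀ k, k ≤ ct.length → prevD.getD k 0 = Espec cs ct i k) :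
    ∀ j, j ≤ ct.length → ∀ k, k ≤ j →
      (rowA ct (cs.getD i ' ') prevD ((i : Int) + 1) j).1.getD k 0 = Espec cs ct (i+1) k ∧
      (rowA ct (cs.getD i ' ') prevD ((i : Int) + 1) j).2.getD k 'N' = Bspec cs ct (i+1) k := by
  intro j
  induction j with
  | zero =>
    intro _ k hk
    interval_cases k
    simp [rowA, Espec, Bspec]
  | succ j ih =>
    intro hj k hk
    simp only [rowA]
    rcases Nat.lt_or_ge k (j+1) with hlt | hge
    · have hk' : k ≤ j := by omega
      have h1 := (rowA_len ct (cs.getD i ' ') prevD ((i : Int) + 1) j).1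
      have h2 := (rowA_len ct (cs.getD i ' ') prevD ((i : Int) + 1) j).2
      have := ih (by omega) k hk'
      split
      · exact ⟨by rw [getD_snoc_lt _ _ _ k (by rw [h1]; omega)]; exact this.1,
               by rw [getD_snoc_lt _ _ _ k (by rw [h2]; omega)]; exact this.2⟩
      · exact ⟨by rw [getD_snoc_lt _ _ _ k (by rw [h1]; omega)]; exact this.1,
               by rw [getD_snoc_lt _ _ _ k (by rw [h2]; omega)]; exact this.2⟩
    · have hkeq : k = j + 1 := by omega
      subst hkeq
      have h1 := (rowA_len ct (cs.getD i ' ') prevD ((i : Int) + 1) j).1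
      have h2 := (rowA_len ct (cs.getD i ' ') prevD ((i : Int) + 1) j).2
      have hleft := (ih (by omega) j (le_refl j)).1
      have hd := hprev j (by omega)
      have hu := hprev (j+1) hj
      by_cases hc : cs[i]?.getD ' ' = ct[j]?.getD ' '
      · rw [if_pos (by simp [hc])]
        refine ⟨?_, ?_⟩
        · rw [getD_snoc_at _ _ _ _ h1, hd]
          have he : Espec cs ct (i+1) (j+1) = Espec cs ct i j := by
            rw [Espec]; simp [hc]
          rw [he]
        · rw [getD_snoc_at _ _ _ _ h2]
          have hb : Bspec cs ct (i+1) (j+1) = 'D' := by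
            rw [Bspec]; simp [hc]
          rw [hb]
      · rw [if_neg (by simp [hc])]
        refine ⟨?_, ?_⟩
        · rw [getD_snoc_at _ _ _ _ h1, hd, hu, hleft]
          have he : Espec cs ct (i+1) (j+1) =
              (pickMinA (Espec cs ct i j + 1, 'D') (Espec cs ct i (j+1) + 1, 'U')
                        (Espec cs ct (i+1) j + 1, 'L')).1 := by
            rw [Espec]; simp [hc]
          rw [he]
        · rw [getD_snoc_at _ _ _ _ h2, hd, hu, hleft]
          have hb : Bspec cs ct (i+1) (j+1) =
              (pickMinA (Espec cs ct i j + 1, 'D') (Espec cs ct i (j+1) + 1, 'U')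
                        (Espec cs ct (i+1) j + 1, 'L')).2 := by
            rw [Bspec]; simp [hc]
          rw [hb]

theorem tableA_spec (cs ct : List Char) :
    ∀ i, (tableA cs ct ct.length i).1.length = i + 1 ∧
         (tableA cs ct ct.length i).2.length = i + 1 ∧
      (∀ a, a ≤ i → ∀ k, k ≤ ct.length →
        ((tableA cs ct ct.length i).1.getD a []).getD k 0 = Espec cs ct a k ∧
        ((tableA cs ct ct.length i).2.getD a []).getD k 'N' = Bspec cs ct a k) := by
  intro i
  induction i with
  | zero =>
    refine ⟨by simp [tableA], by simp [tableA], ?_⟩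
    intro a ha k hk
    interval_cases a
    constructor
    · show ((([dpRow0 ct.length] : List (List Int)).getD 0 []).getD k 0) = _
      rw [List.getD_cons_zero, dpRow0_getD ct.length k hk]
      cases k with
      | zero => simp [Espec]
      | succ k => simp [Espec]
    · show ((['N' :: List.replicate ct.length 'L'].getD 0 []).getD k 'N') = _
      rw [List.getD_cons_zero]
      cases k with
      | zero => simp [Bspec, List.getD]
      | succ k =>
        have : k < ct.length := by omega
        simp [Bspec, List.getD, this]
  | succ i ih =>
    obtain ⟨hl1, hl2, hcell⟩ := ih
    have hprev : ∀ k, k ≤ ct.length →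
        ((tableA cs ct ct.length i).1.getD i []).getD k 0 = Espec cs ct i k :=
      fun k hk => (hcell i (le_refl i) k hk).1
    refine ⟨?_, ?_, ?_⟩
    · simp [tableA, hl1]
    · simp [tableA, hl2]
    · intro a ha k hk
      simp only [tableA]
      rcases Nat.lt_or_ge a (i+1) with hlt | hge
      · rw [getD_snoc_lt _ _ _ a (by rw [hl1]; omega), getD_snoc_lt _ _ _ a (by rw [hl2]; omega)]
        exact hcell a (by omega) k hk
      · have haeq : a = i + 1 := by omega
        subst haeq
        rw [getD_snoc_at _ _ _ _ hl1, getD_snoc_at _ _ _ _ hl2]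
        exact rowA_spec cs ct i _ hprev ct.length (le_refl _) k hk

-- the value component of B's cell is A's dp value
theorem Fspec_val (cs ct : List Char) :
    ∀ i j, (Fspec cs ct i j).1 = Espec cs ct i j := by
  intro i
  induction i with
  | zero => intro j; cases j <;> simp [Fspec, Espec]
  | succ i ih =>
    intro j
    induction j with
    | zero => simp [Fspec, Espec]
    | succ j ihj =>
      by_cases hc : cs.getD i ' ' == ct.getD j ' '
      · rw [Fspec, Espec]; simp only [hc, if_true]; exact ih j
      · rw [Fspec, Espec]
        simp only [hc]
        simp only [pickMinF, pickMinA]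
        have h1 := ih j
        have h2 := ih (j+1)
        have h3 := ihj
        split_ifs <;> simp_all <;> omega

theorem rowF_len (ct : List Char) (c : Char) (prev : List (Int × List Char × List Char))
    (start : Int × List Char × List Char) (j : Nat) :
    (rowF ct c prev start j).length = j + 1 := by
  induction j with
  | zero => simp [rowF]
  | succ j ih =>
    simp only [rowF]
    split <;> simp [ih]

theorem rowF_spec (cs ct : List Char) (i : Nat) (prev : List (Int × List Char × List Char))
    (hprev : ∀ k, k ≤ ct.length → prev.getD k (0, [], []) = Fspec cs ct i k) :
    ∀ j, j ≤ ct.length → ∀ k, k ≤ j →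
      (rowF ct (cs.getD i ' ') prev
        (((i : Int) + 1), cs.take (i+1), List.replicate (i+1) '-') j).getD k (0, [], [])
        = Fspec cs ct (i+1) k := by
  intro j
  induction j with
  | zero =>
    intro _ k hk
    interval_cases k
    simp [rowF, Fspec]
  | succ j ih =>
    intro hj k hk
    simp only [rowF]
    rcases Nat.lt_or_ge k (j+1) with hlt | hge
    · have h1 := rowF_len ct (cs.getD i ' ') prev
        (((i : Int) + 1), cs.take (i+1), List.replicate (i+1) '-') j
      have := ih (by omega) k (by omega)
      split <;> · rw [getD_snoc_lt _ _ _ k (by rw [h1]; omega)]; exact this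
    · have hkeq : k = j + 1 := by omega
      subst hkeq
      have h1 := rowF_len ct (cs.getD i ' ') prev
        (((i : Int) + 1), cs.take (i+1), List.replicate (i+1) '-') j
      have hleft := ih (by omega) j (le_refl j)
      have hd := hprev j (by omega)
      have hu := hprev (j+1) hj
      by_cases hc : cs.getD i ' ' == ct.getD j ' '
      · rw [if_pos hc, getD_snoc_at _ _ _ _ h1, hd]
        conv_rhs => rw [Fspec]
        simp only [hc, if_true]
      · rw [if_neg hc, getD_snoc_at _ _ _ _ h1, hd, hu, hleft]
        conv_rhs => rw [Fspec]
        simp only [hc, Bool.false_eq_true, if_false]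

theorem rowsF_spec (cs ct : List Char) :
    ∀ i, ∀ k, k ≤ ct.length →
      (rowsF cs ct ct.length i).getD k (0, [], []) = Fspec cs ct i k := by
  intro i
  induction i with
  | zero =>
    intro k hk
    have hk' : k < ct.length + 1 := by omega
    simp only [rowsF]
    rw [List.getD_eq_getElem?_getD]
    rw [List.getElem?_map]
    simp [List.getElem?_range hk', Fspec]
  | succ i ih =>
    intro k hk
    simp only [rowsF]
    exact rowF_spec cs ct i _ (fun k hk => ih k hk) ct.length (le_refl _) k hk

-- reverse of a take / replicate step, used in the backtrack correspondence
theorem take_succ_getD (l : List Char) (j : Nat) (h : j < l.length) :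
    l.take (j+1) = l.take j ++ [l.getD j ' '] := by
  have : l.getD j ' ' = l[j] := by simp [List.getD, List.getElem?_eq_getElem h]
  rw [this, List.take_add_one, List.getElem?_eq_getElem h]
  rfl

-- the backtrack of A, run on the correct back table, accumulates exactly the reverse of
-- the alignment strings B's cell (i, j) carries
theorem loopA_F (cs ct : List Char) (bkT : List (List Char))
    (hbk : ∀ a b, a ≤ cs.length → b ≤ ct.length →
      (bkT.getD a []).getD b 'N' = Bspec cs ct a b) :
    ∀ fuel i j sa ta, i ≤ cs.length → j ≤ ct.length → i + j ≤ fuel →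
      loopA bkT cs ct fuel i j sa ta =
        (sa ++ (Fspec cs ct i j).2.1.reverse, ta ++ (Fspec cs ct i j).2.2.reverse) := by
  intro fuel
  induction fuel with
  | zero =>
    intro i j sa ta hi hj hf
    have : i = 0 ∧ j = 0 := by omega
    obtain ⟨rfl, rfl⟩ := this
    simp [loopA, Fspec]
  | succ fuel ih =>
    intro i j sa ta hi hj hf
    simp only [loopA]
    by_cases h0 : i = 0 ∧ j = 0
    · obtain ⟨rfl, rfl⟩ := h0
      simp [Fspec]
    · simp only [h0, if_false]
      rw [hbk i j hi hj]
      match i, j with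
      | 0, 0 => exact absurd ⟨rfl, rfl⟩ h0
      | 0, j+1 =>
        rw [show Bspec cs ct 0 (j+1) = 'L' from rfl]
        rw [if_neg (by decide), if_neg (by decide), if_pos rfl]
        simp only [Nat.add_sub_cancel]
        rw [ih 0 j _ _ (by omega) (by omega) (by omega)]
        have hFsa : (Fspec cs ct 0 (j+1)).2.1 = (Fspec cs ct 0 j).2.1 ++ ['-'] := by
          simp [Fspec, List.replicate_succ' (n := j)]
        have hFta : (Fspec cs ct 0 (j+1)).2.2 = (Fspec cs ct 0 j).2.2 ++ [ct.getD j ' '] := by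
          simp only [Fspec]
          exact take_succ_getD ct j (by omega)
        rw [hFsa, hFta]
        simp
      | i+1, 0 =>
        rw [show Bspec cs ct (i+1) 0 = 'U' from rfl]
        rw [if_neg (by decide), if_pos rfl]
        simp only [Nat.add_sub_cancel]
        rw [ih i 0 _ _ (by omega) (by omega) (by omega)]
        have hFsa : (Fspec cs ct (i+1) 0).2.1 = (Fspec cs ct i 0).2.1 ++ [cs.getD i ' '] := by
          cases i with
          | zero => simp [Fspec, take_succ_getD cs 0 (by omega)]
          | succ i' => simp only [Fspec]; exact take_succ_getD cs (i'+1) (by omega)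
        have hFta : (Fspec cs ct (i+1) 0).2.2 = (Fspec cs ct i 0).2.2 ++ ['-'] := by
          cases i with
          | zero => simp [Fspec]
          | succ i' => simp [Fspec, List.replicate_succ' (n := i'+1)]
        rw [hFsa, hFta]
        simp
      | i+1, j+1 =>
        simp only [Nat.add_sub_cancel]
        by_cases hc : cs.getD i ' ' == ct.getD j ' '
        · have hbd : Bspec cs ct (i+1) (j+1) = 'D' := by rw [Bspec]; simp_all
          rw [hbd, if_pos rfl]
          rw [ih i j _ _ (by omega) (by omega) (by omega)]
          have hF : Fspec cs ct (i+1) (j+1) =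
              ((Fspec cs ct i j).1, (Fspec cs ct i j).2.1 ++ [cs.getD i ' '],
               (Fspec cs ct i j).2.2 ++ [ct.getD j ' ']) := by
            rw [Fspec]; simp only [hc, if_true]
          rw [hF]
          simp
        · have hB : Bspec cs ct (i+1) (j+1) =
              (pickMinA (Espec cs ct i j + 1, 'D') (Espec cs ct i (j+1) + 1, 'U')
                        (Espec cs ct (i+1) j + 1, 'L')).2 := by
            rw [Bspec]; simp only [hc, Bool.false_eq_true, if_false]
          have hF : Fspec cs ct (i+1) (j+1) =
              let q := pickMinF
                ((Fspec cs ct i j).1, (Fspec cs ct i j).2.1 ++ [cs.getD i ' '],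
                 (Fspec cs ct i j).2.2 ++ [ct.getD j ' '])
                ((Fspec cs ct i (j+1)).1, (Fspec cs ct i (j+1)).2.1 ++ [cs.getD i ' '],
                 (Fspec cs ct i (j+1)).2.2 ++ ['-'])
                ((Fspec cs ct (i+1) j).1, (Fspec cs ct (i+1) j).2.1 ++ ['-'],
                 (Fspec cs ct (i+1) j).2.2 ++ [ct.getD j ' '])
              (q.1 + 1, q.2) := by
            rw [Fspec]; simp only [hc, Bool.false_eq_true, if_false]
          have e1 := Fspec_val cs ct i j
          have e2 := Fspec_val cs ct i (j+1)
          have e3 := Fspec_val cs ct (i+1) j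
          by_cases h1 : Espec cs ct i (j+1) + 1 < Espec cs ct i j + 1
          · by_cases h2 : Espec cs ct (i+1) j + 1 < Espec cs ct i (j+1) + 1
            · -- L chosen
              have : Bspec cs ct (i+1) (j+1) = 'L' := by
                rw [hB]; simp only [pickMinA]; rw [if_pos h1, if_pos h2]
              rw [this, if_neg (by decide), if_neg (by decide), if_pos rfl]
              rw [ih (i+1) j _ _ (by omega) (by omega) (by omega)]
              have : Fspec cs ct (i+1) (j+1) =
                  (Espec cs ct (i+1) j + 1, (Fspec cs ct (i+1) j).2.1 ++ ['-'],
                   (Fspec cs ct (i+1) j).2.2 ++ [ct.getD j ' ']) := by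
                rw [hF]; simp only [pickMinF]
                rw [e1, e2, e3, if_pos (by omega : Espec cs ct i (j+1) < Espec cs ct i j),
                    if_pos (by omega : Espec cs ct (i+1) j < Espec cs ct i (j+1))]
              rw [this]; simp
            · -- U chosen
              have : Bspec cs ct (i+1) (j+1) = 'U' := by
                rw [hB]; simp only [pickMinA]; rw [if_pos h1, if_neg h2]
              rw [this, if_neg (by decide), if_pos rfl]
              rw [ih i (j+1) _ _ (by omega) (by omega) (by omega)]
              have : Fspec cs ct (i+1) (j+1) =
                  (Espec cs ct i (j+1) + 1, (Fspec cs ct i (j+1)).2.1 ++ [cs.getD i ' '],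
                   (Fspec cs ct i (j+1)).2.2 ++ ['-']) := by
                rw [hF]; simp only [pickMinF]
                rw [e1, e2, e3, if_pos (by omega : Espec cs ct i (j+1) < Espec cs ct i j),
                    if_neg (by omega : ¬ Espec cs ct (i+1) j < Espec cs ct i (j+1))]
              rw [this]; simp
          · by_cases h2 : Espec cs ct (i+1) j + 1 < Espec cs ct i j + 1
            · -- L chosen
              have : Bspec cs ct (i+1) (j+1) = 'L' := by
                rw [hB]; simp only [pickMinA]; rw [if_neg h1, if_pos h2]
              rw [this, if_neg (by decide), if_neg (by decide), if_pos rfl]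
              rw [ih (i+1) j _ _ (by omega) (by omega) (by omega)]
              have : Fspec cs ct (i+1) (j+1) =
                  (Espec cs ct (i+1) j + 1, (Fspec cs ct (i+1) j).2.1 ++ ['-'],
                   (Fspec cs ct (i+1) j).2.2 ++ [ct.getD j ' ']) := by
                rw [hF]; simp only [pickMinF]
                rw [e1, e2, e3, if_neg (by omega : ¬ Espec cs ct i (j+1) < Espec cs ct i j),
                    if_pos (by omega : Espec cs ct (i+1) j < Espec cs ct i j)]
              rw [this]; simp
            · -- D chosen
              have : Bspec cs ct (i+1) (j+1) = 'D' := by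
                rw [hB]; simp only [pickMinA]; rw [if_neg h1, if_neg h2]
              rw [this, if_pos rfl]
              rw [ih i j _ _ (by omega) (by omega) (by omega)]
              have : Fspec cs ct (i+1) (j+1) =
                  (Espec cs ct i j + 1, (Fspec cs ct i j).2.1 ++ [cs.getD i ' '],
                   (Fspec cs ct i j).2.2 ++ [ct.getD j ' ']) := by
                rw [hF]; simp only [pickMinF]
                rw [e1, e2, e3, if_neg (by omega : ¬ Espec cs ct i (j+1) < Espec cs ct i j),
                    if_neg (by omega : ¬ Espec cs ct (i+1) j < Espec cs ct i j)]
              rw [this]; simp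

-- ===== VERDICT (by name: the statement is the Claim_ definition above) =====
theorem edit_distance_alignment_spec : Claim_equal_edit_distance_alignment := by
  intro s t _
  unfold Spec_edit_distance_alignment edit_distance_alignment edit_distance_alignment_alt
  simp only
  set cs := s.toList
  set ct := t.toList
  have hA := tableA_spec cs ct cs.length
  have hbk : ∀ a b, a ≤ cs.length → b ≤ ct.length →
      (((tableA cs ct ct.length cs.length).2).getD a []).getD b 'N' = Bspec cs ct a b :=
    fun a b ha hb => (hA.2.2 a ha b hb).2
  have hdist : (((tableA cs ct ct.length cs.length).1).getD cs.length []).getD ct.length 0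
      = Espec cs ct cs.length ct.length :=
    (hA.2.2 cs.length (le_refl _) ct.length (le_refl _)).1
  have hloop := loopA_F cs ct _ hbk (cs.length + ct.length) cs.length ct.length [] []
    (le_refl _) (le_refl _) (le_refl _)
  have hB := rowsF_spec cs ct cs.length ct.length (le_refl _)
  rw [hdist, hloop, hB, Fspec_val]
  simp
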